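-- pv_equiv track=rewrite | github.com/bharani018/DataStructures_and_Algorithms | Python/Array/chalk.py | Chalks
-- ===== SOURCE A (Python) =====
-- def Chalks(chalk, target):
--     x = target
--     temp = target
--     c = 0
--     while(target>=chalk[0]):
--         i=0
--         while(temp>=chalk[0] and i<len(chalk)):
--             temp -= chalk[i]
--             c+=chalk[i]
--             i+=1
--
--         target = temp
--     return c
-- ===== SOURCE B (Python) =====
-- def Chalks(chalk, target):
--     first = chalk[0]
--     if target < first:
--         return 0
--     s = sum(chalk)
--     # M = max prefix sum taken before each element (so M >= 0)
--     M = 0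
--     p = 0
--     for v in chalk:
--         if p > M:
--             M = p
--         p += v
--     T = first + M
--     t = target
--     if s > 0 and t >= T:
--         # skip all full cycles at once
--         k = (t - T) // s + 1
--         t -= k * s
--     # one final partial pass
--     for v in chalk:
--         if t < first:
--             break
--         t -= v
--     return target - t
-- ===== Notes on version B (the rewrite author's own statement) =====
-- stated objective: faster
-- what changed: replaces the cycle-by-cycle while-loop simulation with a closed form: all full passes over chalk are skipped at once by dividing by sum(chalk) (using the max prefix sum to know when a pass completes fully), followed by a single partial pass.
import Mathlib
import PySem

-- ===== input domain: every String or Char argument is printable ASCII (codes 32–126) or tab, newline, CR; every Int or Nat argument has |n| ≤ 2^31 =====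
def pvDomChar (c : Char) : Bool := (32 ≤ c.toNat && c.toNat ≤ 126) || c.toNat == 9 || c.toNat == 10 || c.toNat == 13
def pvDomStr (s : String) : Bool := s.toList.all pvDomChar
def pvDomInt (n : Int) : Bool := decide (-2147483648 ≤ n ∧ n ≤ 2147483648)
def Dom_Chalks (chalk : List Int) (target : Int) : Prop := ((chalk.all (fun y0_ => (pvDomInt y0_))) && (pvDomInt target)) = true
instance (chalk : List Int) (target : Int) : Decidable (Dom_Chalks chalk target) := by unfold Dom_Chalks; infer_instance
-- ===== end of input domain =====

-- B is faster: it skips all full passes over chalk with one division by sum(chalk) instead of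
-- simulating them one by one, then does a single partial pass.

-- ===== PORT A =====
-- inner while: 'while temp >= chalk[0] and i < len(chalk): temp -= chalk[i]; c += chalk[i]; i += 1'
-- (walking index i over chalk = structural recursion over the remaining list)
def pvInnerA (first : Int) : List Int → Int → Int → Int × Int
  | [], temp, c => (temp, c)
  | v :: rest, temp, c =>
      if first ≤ temp then pvInnerA first rest (temp - v) (c + v) else (temp, c)

-- outer while: 'while target >= chalk[0]: <inner pass>; target = temp'; the fuel only
-- totalizes the loop (it is never exhausted on inputs satisfying Pre_Chalks).
def pvOuterA (chalk : List Int) (first : Int) : Nat → Int → Int → Int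
  | 0, _, c => c
  | fuel + 1, target, c =>
      if first ≤ target then
        let r := pvInnerA first chalk target c
        pvOuterA chalk first fuel r.1 r.2
      else c

def Chalks (chalk : List Int) (target : Int) : Int :=
  -- chalk.headI = chalk[0]; Pre_Chalks guarantees chalk ≠ []
  pvOuterA chalk chalk.headI ((target - chalk.headI).toNat + 2) target 0

-- ===== PORT B =====
-- 'M = 0; p = 0; for v in chalk: if p > M: M = p; p += v'  (max prefix sum before each element)
def pvMaxPrefix : List Int → Int → Int → Int
  | [], _, m => m
  | v :: rest, p, m => pvMaxPrefix rest (p + v) (max m p)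

-- 'for v in chalk: if t < first: break; t -= v'
def pvPassB (first : Int) : List Int → Int → Int
  | [], t => t
  | v :: rest, t => if t < first then t else pvPassB first rest (t - v)

def Chalks_alt (chalk : List Int) (target : Int) : Int :=
  if target < chalk.headI then 0
  else
    target - pvPassB chalk.headI chalk
      (if 0 < chalk.sum ∧ chalk.headI + pvMaxPrefix chalk 0 0 ≤ target
       then target -
         (PySem.Int.floordiv (target - (chalk.headI + pvMaxPrefix chalk 0 0)) chalk.sum + 1)
           * chalk.sum
       else target)

-- ===== PRECONDITION & SPEC =====
-- Pre_ excludes exactly the inputs on which Python A does not return: chalk = [] (IndexError on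
-- chalk[0]) and the inputs where sum(chalk) ≤ 0 and every checkpoint target - sum(chalk[:i])
-- stays ≥ chalk[0]: there every pass completes fully without decreasing temp, so A loops forever.
def Pre_Chalks (chalk : List Int) (target : Int) : Prop :=
  chalk ≠ [] ∧
    ((∃ i < chalk.length, target - (chalk.take i).sum < chalk.headI) ∨ 0 < chalk.sum)
instance (chalk : List Int) (target : Int) : Decidable (Pre_Chalks chalk target) := by
  unfold Pre_Chalks; infer_instance

def pvWitness_Chalks : List Int × Int := ([2, 1, 3], 20)

def Spec_Chalks (chalk : List Int) (target : Int) (out : Int) : Prop := out = Chalks_alt chalk target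
instance (chalk : List Int) (target : Int) (out : Int) : Decidable (Spec_Chalks chalk target out) := by unfold Spec_Chalks; infer_instance

-- ===== CLAIM (what is proved, stated in full; the proofs are below) =====
def Claim_equal_Chalks : Prop := ∀ (chalk : List Int) (target : Int), Dom_Chalks chalk target → Pre_Chalks chalk target → Spec_Chalks chalk target (Chalks chalk target)

-- ===== LEMMAS AND PROOFS =====

-- 'the pass starting at t completes all its checks' (A checks first ≤ temp before each element)
def pvFullOK (first : Int) : List Int → Int → Prop
  | [], _ => True
  | v :: rest, t => first ≤ t ∧ pvFullOK first rest (t - v)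

-- pvMaxPrefix characterises pvFullOK
theorem pvMaxPrefix_le_iff (first : Int) (l : List Int) :
    ∀ (p m t : Int), first + pvMaxPrefix l p m ≤ t ↔ (first + m ≤ t ∧ pvFullOK first l (t - p)) := by
  induction l with
  | nil => intro p m t; simp [pvMaxPrefix, pvFullOK]
  | cons v rest ih =>
      intro p m t
      have e : t - p - v = t - (p + v) := by ring
      simp only [pvMaxPrefix, pvFullOK, ih (p + v) (max m p) t, e]
      constructor
      · rintro ⟨h1, h2⟩
        exact ⟨by omega, by omega, h2⟩
      · rintro ⟨h1, h2, h3⟩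
        exact ⟨by omega, h3⟩

-- the inner pass: its temp component is pvPassB, and c grows by exactly what temp lost
theorem pvInnerA_eq (first : Int) (l : List Int) :
    ∀ (t c : Int), pvInnerA first l t c = (pvPassB first l t, c + (t - pvPassB first l t)) := by
  induction l with
  | nil => intro t c; simp [pvInnerA, pvPassB]
  | cons v rest ih =>
      intro t c
      simp only [pvInnerA, pvPassB]
      by_cases h : first ≤ t
      · rw [if_pos h, if_neg (by omega), ih]
        have : c + v + (t - v - pvPassB first rest (t - v))
             = c + (t - pvPassB first rest (t - v)) := by ring
        rw [this]
      · rw [if_neg h, if_pos (by omega)]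
        simp

-- a full pass subtracts exactly the sum
theorem pvPassB_full (first : Int) (l : List Int) :
    ∀ t, pvFullOK first l t → pvPassB first l t = t - l.sum := by
  induction l with
  | nil => intro t _; simp [pvPassB]
  | cons v rest ih =>
      intro t h
      obtain ⟨h1, h2⟩ := h
      simp only [pvPassB, List.sum_cons, if_neg (by omega : ¬ t < first)]
      rw [ih _ h2]; ring

-- a non-full pass ends below first
theorem pvPassB_partial (first : Int) (l : List Int) :
    ∀ t, ¬ pvFullOK first l t → pvPassB first l t < first := by
  induction l with
  | nil => intro t h; exact absurd trivial h
  | cons v rest ih =>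
      intro t h
      simp only [pvFullOK, not_and_or] at h
      simp only [pvPassB]
      by_cases hf : t < first
      · rw [if_pos hf]; exact hf
      · rw [if_neg hf]
        exact ih _ (h.resolve_left (by omega))

theorem pvPassB_below (first : Int) (l : List Int) (t : Int) (h : t < first) :
    pvPassB first l t = t := by
  cases l with
  | nil => rfl
  | cons v rest => simp [pvPassB, if_pos h]

-- a full pass over a NONEMPTY list starts at or above first
theorem pvFullOK_head (first v : Int) (rest : List Int) (t : Int)
    (h : pvFullOK first (v :: rest) t) : first ≤ t := h.1

-- outer loop, case target < first: returns c whatever the fuel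
theorem pvOuterA_stop (chalk : List Int) (first : Int) :
    ∀ fuel t c, t < first → pvOuterA chalk first fuel t c = c := by
  intro fuel t c h
  cases fuel with
  | zero => rfl
  | succ n => simp [pvOuterA, if_neg (by omega : ¬ first ≤ t)]

-- outer loop, last (partial) pass
theorem pvOuterA_partial (chalk : List Int) (first : Int) (fuel : Nat) (t c : Int)
    (hfuel : 1 ≤ fuel) (hT : ¬ pvFullOK first chalk t) :
    pvOuterA chalk first fuel t c = c + (t - pvPassB first chalk t) := by
  by_cases hf : t < first
  · rw [pvOuterA_stop chalk first fuel t c hf, pvPassB_below first chalk t hf]; ring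
  · obtain ⟨n, rfl⟩ : ∃ n, fuel = n + 1 := ⟨fuel - 1, by omega⟩
    simp only [pvOuterA, if_pos (by omega : first ≤ t), pvInnerA_eq]
    exact pvOuterA_stop chalk first n _ _ (pvPassB_partial first chalk t hT)

-- outer loop, k full passes then a partial one
theorem pvOuterA_skip (chalk : List Int) (first : Int)
    (hM : ∀ t, first + pvMaxPrefix chalk 0 0 ≤ t ↔ (first ≤ t ∧ pvFullOK first chalk t)) :
    ∀ (k : Nat) (fuel : Nat) (t c : Int), k + 1 ≤ fuel →
      ¬ pvFullOK first chalk (t - k * chalk.sum) →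
      (∀ j : Nat, j < k → first + pvMaxPrefix chalk 0 0 ≤ t - j * chalk.sum) →
      pvOuterA chalk first fuel t c = c + (t - pvPassB first chalk (t - k * chalk.sum)) := by
  intro k
  induction k with
  | zero =>
      intro fuel t c hfuel hpart _
      simp only [Nat.cast_zero, zero_mul, sub_zero] at hpart ⊢
      exact pvOuterA_partial chalk first fuel t c hfuel hpart
  | succ k ih =>
      intro fuel t c hfuel hpart hfull
      have h0 : first + pvMaxPrefix chalk 0 0 ≤ t := by
        simpa using hfull 0 (by omega)
      obtain ⟨hft, hfok⟩ := (hM t).mp h0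
      obtain ⟨n, rfl⟩ : ∃ n, fuel = n + 1 := ⟨fuel - 1, by omega⟩
      simp only [pvOuterA, if_pos hft, pvInnerA_eq, pvPassB_full first chalk t hfok]
      have e : ∀ j : Nat, t - chalk.sum - (j : Int) * chalk.sum = t - ((j : Nat) + 1 : Nat) * chalk.sum := by
        intro j; push_cast; ring
      rw [ih n (t - chalk.sum) (c + (t - (t - chalk.sum)))
        (by omega)
        (by rw [e k]; exact hpart)
        (by intro j hj; rw [e j]; exact hfull (j + 1) (by omega))]
      rw [e k]; ring

-- pvFullOK is 'every checkpoint passes'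
theorem pvFullOK_iff (first : Int) (l : List Int) :
    ∀ t, pvFullOK first l t ↔ ∀ i < l.length, first ≤ t - (l.take i).sum := by
  induction l with
  | nil => intro t; simp [pvFullOK]
  | cons v rest ih =>
      intro t
      constructor
      · rintro ⟨h1, h2⟩ i hi
        cases i with
        | zero => simpa using h1
        | succ j =>
            have := (ih (t - v)).mp h2 j (by simpa using hi)
            simpa [List.take_succ_cons, sub_sub] using this
      · intro h
        refine ⟨by simpa using h 0 (by simp), (ih (t - v)).mpr ?_⟩
        intro j hj
        have := h (j + 1) (by simpa using hj)
        simpa [List.take_succ_cons, sub_sub] using this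

theorem Chalks_eq (chalk : List Int) (target : Int) (hpre : Pre_Chalks chalk target) :
    Chalks chalk target = Chalks_alt chalk target := by
  obtain ⟨hne, hterm0⟩ := hpre
  have hM : ∀ t, chalk.headI + pvMaxPrefix chalk 0 0 ≤ t ↔
      (chalk.headI ≤ t ∧ pvFullOK chalk.headI chalk t) := by
    intro t
    have := pvMaxPrefix_le_iff chalk.headI chalk 0 0 t
    simpa using this
  have hMnn : 0 ≤ pvMaxPrefix chalk 0 0 := by
    have := (hM (chalk.headI + pvMaxPrefix chalk 0 0)).mp (le_refl _)
    omega
  have hterm : target < chalk.headI + pvMaxPrefix chalk 0 0 ∨ 0 < chalk.sum := by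
    rcases hterm0 with ⟨i, hi, hlt⟩ | h
    · left
      by_contra hc
      rw [not_lt] at hc
      obtain ⟨-, hfok⟩ := (hM target).mp hc
      have := (pvFullOK_iff chalk.headI chalk target).mp hfok i hi
      omega
    · right; exact h
  set first := chalk.headI with hfirst
  set M := pvMaxPrefix chalk 0 0 with hMdef
  set s := chalk.sum with hsdef
  unfold Chalks Chalks_alt
  rw [← hfirst, ← hMdef, ← hsdef]
  by_cases h1 : target < first
  · rw [if_pos h1, pvOuterA_stop chalk first _ target 0 h1]
  · rw [if_neg h1]
    by_cases h2 : 0 < s ∧ first + M ≤ target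
    · rw [if_pos h2]
      obtain ⟨hs, hT⟩ := h2
      set q : Int := PySem.Int.floordiv (target - (first + M)) s with hq
      obtain ⟨hql, hqu⟩ : q * s ≤ target - (first + M) ∧ target - (first + M) < (q + 1) * s :=
        (PySem.Int.floordiv_eq_iff_of_pos hs).mp hq.symm
      have hq0 : 0 ≤ q := by nlinarith
      set k : Nat := q.toNat + 1 with hk
      have hkq : (k : Int) = q + 1 := by rw [hk]; push_cast; omega
      have hfuel : k + 1 ≤ (target - first).toNat + 2 := by
        have hq2 : q ≤ target - (first + M) :=
          le_trans (le_mul_of_one_le_right hq0 hs) hql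
        omega
      have hlt : target - (k : Int) * s < first + M := by rw [hkq]; omega
      rw [pvOuterA_skip chalk first hM k _ target 0 hfuel
        (by intro hc
            obtain ⟨v, rest, rfl⟩ : ∃ v rest, chalk = v :: rest := by
              cases chalk with
              | nil => exact absurd rfl hne
              | cons v rest => exact ⟨v, rest, rfl⟩
            have hge := pvFullOK_head first v rest _ hc
            have := (hM (target - (k : Int) * s)).mpr ⟨hge, hc⟩
            omega)
        (by intro j hj
            simp only [← hsdef, ← hMdef]
            have hjq : (j : Int) ≤ q := by omega
            have : (j : Int) * s ≤ q * s := mul_le_mul_of_nonneg_right hjq (by omega)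
            omega)]
      rw [hkq]; ring
    · rw [if_neg h2]
      have hT : ¬ (first + M ≤ target) := by
        rcases hterm with h | h
        · omega
        · intro hc; exact h2 ⟨h, hc⟩
      have hpart : ¬ pvFullOK first chalk target := fun hc =>
        hT ((hM target).mpr ⟨by omega, hc⟩)
      rw [pvOuterA_partial chalk first _ target 0 (by omega) hpart]
      ring

-- ===== VERDICT (by name: the statement is the Claim_ definition above) =====
theorem Chalks_spec : Claim_equal_Chalks := by
  intro chalk target _ hpre
  unfold Spec_Chalks
  exact Chalks_eq chalk target hpre
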